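-- pv_equiv track=rewrite | github.com/J-ally/TRACE_IODAA | TRACE_module/utils.py | subset_int_consecutif
-- ===== SOURCE A (Python) =====
-- from itertools import chain, combinations
--
-- def are_consecutive(liste_num : list[int]) -> bool :
--     """True si c'est une liste d'entier consécutifs
--
--     Args:
--         liste_num (list[int]): liste d'entiers
--
--     Returns:
--         bool: True -> Liste d'entier consécutifs ; False sinon
--     """
--     assert len(liste_num) >= 2; "Une liste vide ou de longueur 1 ne contient pas d'entier consécutifs"
--     num = liste_num[0]
--     ind = 1
--     while ind < len(liste_num) and (num + 1 == liste_num[ind]):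
--         num = liste_num[ind]
--         ind += 1
--     return (ind == len(liste_num))
--
-- def powerset(liste_num : list[int]) -> list:
--     """Powerset d'un iterable
--
--     Args:
--         iterable : Iterable
--
--     Returns:
--         list: liste de tous les sous ensembles possibles
--     """
--     s = list(liste_num)
--     return list(chain.from_iterable(combinations(s, r) for r in range(len(s)+1)))
--
-- def subset_int_consecutif(liste_num : list[int]) -> list:
--     """Fonction qui renvoie tous les subsets d'entiers consécutifs à partir d'une liste d'entier
--
--     Args:
--         liste_num (list[int]): liste d'entier ordonnée
--
--     Returns:
--         list: liste de tous les subets d'entier consécutifs de la liste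
--     """
--     liste_consecutif = [] #output final avec tous les subsets d'entier consécutifs
--     subsets = powerset(liste_num)[1:] # Premier élément toujours vide
--
--     for list_num in subsets :
--         list_num = list(list_num)
--         if len(list_num) == 1 :  # On ajoute toutes les listes de longueur 1
--             liste_consecutif.append(list_num)
--         else : # Si c'est un liste d'entier consécutifs on les ajoutent
--             if are_consecutive(list_num) : liste_consecutif.append(list_num)
--     return liste_consecutif
-- ===== SOURCE B (Python) =====
-- def subset_int_consecutif(liste_num):
--     """Generate only the consecutive-integer sub-combinations directly
--     (recursively pruning), instead of filtering the whole powerset."""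
--     def runs_from(r, v, l):
--         # length-r combinations of l forming the run v, v+1, ..., v+r-1
--         if r == 0:
--             return [[]]
--         if not l:
--             return []
--         x, xs = l[0], l[1:]
--         head = [[x] + c for c in runs_from(r - 1, v + 1, xs)] if x == v else []
--         return head + runs_from(r, v, xs)
--
--     def chains(r, l):
--         # length-r consecutive combinations of l, in combination (lex) order
--         if not l:
--             return []
--         x, xs = l[0], l[1:]
--         return [[x] + c for c in runs_from(r - 1, x + 1, xs)] + chains(r, xs)
--
--     return [c for r in range(1, len(liste_num) + 1) for c in chains(r, liste_num)]
-- ===== Notes on version B (the rewrite author's own statement) =====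
-- stated objective: faster
-- what changed: B recursively generates only the consecutive-integer combinations (pruning by the required next value) instead of materializing the full 2^n powerset and filtering it.
import Mathlib
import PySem

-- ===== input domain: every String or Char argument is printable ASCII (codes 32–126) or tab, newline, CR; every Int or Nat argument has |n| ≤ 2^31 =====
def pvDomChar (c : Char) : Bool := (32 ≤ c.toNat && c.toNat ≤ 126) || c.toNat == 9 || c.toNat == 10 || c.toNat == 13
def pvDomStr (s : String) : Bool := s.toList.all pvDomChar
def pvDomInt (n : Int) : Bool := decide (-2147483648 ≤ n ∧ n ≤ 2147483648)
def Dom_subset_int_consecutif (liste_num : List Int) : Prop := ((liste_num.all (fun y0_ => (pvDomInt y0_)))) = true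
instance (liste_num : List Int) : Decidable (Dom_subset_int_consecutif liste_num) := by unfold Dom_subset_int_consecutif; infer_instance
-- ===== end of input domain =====

-- B generates only the consecutive-integer combinations directly (recursive pruning by run
-- value) instead of filtering the whole 2^n powerset: alternative/faster by construction.

-- ===== PORT A =====
-- while-loop of are_consecutive: walks the list while each element is predecessor+1
def pvChk (num : Int) (l : List Int) : Bool :=
  match l with
  | [] => true
  | y :: ys => if num + 1 == y then pvChk y ys else false

def are_consecutive (liste_num : List Int) : Bool :=
  match liste_num with
  | [] => true   -- unreachable from subset_int_consecutif (only called with length ≥ 2)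
  | x :: xs => pvChk x xs

-- itertools.combinations(s, r) in the same (lexicographic-by-index) order
def pvCombos : Nat → List Int → List (List Int)
  | 0, _ => [[]]
  | _+1, [] => []
  | r+1, x :: xs => ((pvCombos r xs).map (fun c => x :: c)) ++ pvCombos (r+1) xs

def powerset (liste_num : List Int) : List (List Int) :=
  (List.range (liste_num.length + 1)).flatMap (fun r => pvCombos r liste_num)

def subset_int_consecutif (liste_num : List Int) : List (List Int) :=
  let subsets := (powerset liste_num).drop 1
  subsets.foldl
    (fun acc c =>
      if c.length == 1 then acc ++ [c]
      else if are_consecutive c then acc ++ [c] else acc) []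

-- ===== PORT B =====
-- runs_from in Source B: length-r combinations of l forming the run v, v+1, …
def pvRunsFrom : Nat → Int → List Int → List (List Int)
  | 0, _, _ => [[]]
  | _+1, _, [] => []
  | r+1, v, x :: xs =>
      (if x == v then (pvRunsFrom r (v + 1) xs).map (fun c => x :: c) else [])
        ++ pvRunsFrom (r+1) v xs

-- chains in Source B: length-r consecutive combinations, in combination order
def pvChains (r : Nat) : List Int → List (List Int)
  | [] => []
  | x :: xs => ((pvRunsFrom (r - 1) (x + 1) xs).map (fun c => x :: c)) ++ pvChains r xs

def subset_int_consecutif_alt (liste_num : List Int) : List (List Int) :=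
  (List.range' 1 liste_num.length).flatMap (fun r => pvChains r liste_num)

-- ===== PRECONDITION & SPEC =====
def Spec_subset_int_consecutif (liste_num : List Int) (out : List (List Int)) : Prop := out = subset_int_consecutif_alt liste_num
instance (liste_num : List Int) (out : List (List Int)) : Decidable (Spec_subset_int_consecutif liste_num out) := by unfold Spec_subset_int_consecutif; infer_instance

-- ===== CLAIM (what is proved, stated in full; the proofs are below) =====
def Claim_equal_subset_int_consecutif : Prop := ∀ (liste_num : List Int), Dom_subset_int_consecutif liste_num → Spec_subset_int_consecutif liste_num (subset_int_consecutif liste_num)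

-- ===== LEMMAS AND PROOFS =====

-- "c is the run v, v+1, …" — the invariant behind are_consecutive's loop
def isRunFrom (v : Int) : List Int → Bool
  | [] => true
  | y :: ys => (y == v) && isRunFrom (v + 1) ys

-- A's keep-predicate (length-1 or consecutive)
def pvKeep (c : List Int) : Bool := (c.length == 1) || are_consecutive c

theorem pvChk_eq_isRunFrom (c : List Int) : ∀ x : Int, pvChk x c = isRunFrom (x + 1) c := by
  induction c with
  | nil => intro x; rfl
  | cons y ys ih =>
    intro x
    simp only [pvChk, isRunFrom]
    by_cases h : x + 1 = y
    · subst h; simp [ih]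
    · have h' : ¬ (y = x + 1) := fun hy => h hy.symm
      simp [h, h']

theorem pvKeep_cons (x : Int) (c : List Int) : pvKeep (x :: c) = isRunFrom (x + 1) c := by
  cases c with
  | nil => rfl
  | cons y ys =>
    simp only [pvKeep, are_consecutive, List.length_cons, pvChk_eq_isRunFrom]
    simp

theorem filter_combos (l : List Int) :
    ∀ (r : Nat) (v : Int), (pvCombos r l).filter (isRunFrom v) = pvRunsFrom r v l := by
  induction l with
  | nil =>
    intro r v
    cases r with
    | zero => simp [pvCombos, pvRunsFrom, List.filter, isRunFrom]
    | succ r => simp [pvCombos, pvRunsFrom]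
  | cons x xs ih =>
    intro r v
    cases r with
    | zero => simp [pvCombos, pvRunsFrom, List.filter, isRunFrom]
    | succ r =>
      simp only [pvCombos, pvRunsFrom, List.filter_append]
      rw [List.filter_map]
      have hc : ((isRunFrom v) ∘ fun c => x :: c)
          = fun c => (x == v) && isRunFrom (v + 1) c := by
        funext c; rfl
      rw [hc, ih (r+1) v]
      by_cases h : x = v
      · subst h
        simp only [beq_self_eq_true, Bool.true_and, if_true]
        rw [show (fun c => isRunFrom (x + 1) c) = isRunFrom (x + 1) from rfl, ih r (x + 1)]
      · have hb : (x == v) = false := by simp [h]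
        simp [hb]

theorem filter_keep_combos (l : List Int) :
    ∀ (r : Nat), (pvCombos (r+1) l).filter pvKeep = pvChains (r+1) l := by
  induction l with
  | nil => intro r; simp [pvCombos, pvChains]
  | cons x xs ih =>
    intro r
    simp only [pvCombos, pvChains, List.filter_append]
    rw [List.filter_map]
    have : (pvKeep ∘ fun c => x :: c) = isRunFrom (x + 1) := by
      funext c; simp [Function.comp, pvKeep_cons]
    rw [this, filter_combos, ih r]
    simp

theorem foldl_keep (L : List (List Int)) : ∀ acc : List (List Int),
    L.foldl (fun acc c => if c.length == 1 then acc ++ [c]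
                          else if are_consecutive c then acc ++ [c] else acc) acc
      = acc ++ L.filter pvKeep := by
  induction L with
  | nil => intro acc; simp
  | cons c cs ih =>
    intro acc
    rw [List.foldl_cons, List.filter_cons]
    by_cases h1 : c.length = 1
    · have hb : (c.length == 1) = true := by simpa using h1
      have hk : pvKeep c = true := by simp [pvKeep, hb]
      rw [if_pos hb, ih, hk]
      simp
    · have hb : (c.length == 1) = false := by simpa using h1
      by_cases h2 : are_consecutive c = true
      · have hk : pvKeep c = true := by simp [pvKeep, h2]
        rw [if_pos h2, ih, hk]  -- outer if reduces first
        simp [hb]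
      · have hk : pvKeep c = false := by
          simp [pvKeep, hb, Bool.eq_false_iff.mpr h2]
        rw [ih, hk]
        simp [hb, h2]

-- ===== VERDICT (by name: the statement is the Claim_ definition above) =====
theorem subset_int_consecutif_spec : Claim_equal_subset_int_consecutif := by
  intro l _
  show subset_int_consecutif l = subset_int_consecutif_alt l
  unfold subset_int_consecutif subset_int_consecutif_alt powerset
  rw [foldl_keep]
  rw [List.range_succ_eq_map]
  simp only [List.flatMap_cons, pvCombos, List.flatMap_map, List.singleton_append,
    List.drop_succ_cons, List.drop_zero, List.nil_append, List.filter_flatMap]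
  rw [List.range'_eq_map_range]
  rw [List.flatMap_map]
  have hfun : (fun a : Nat => List.filter pvKeep (pvCombos a.succ l))
      = (fun a : Nat => pvChains (1 + a) l) := by
    funext a
    rw [Nat.add_comm 1 a]
    exact filter_keep_combos l a
  rw [hfun]
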